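-- pv_equiv track=rewrite | github.com/ssafy8th-python/sw-algorithm | sjw/programmers/lgcns 트리.py | solution
-- ===== SOURCE A (Python) =====
-- def solution(edges, roots):
--     edLen = len(edges)
--     answer = [0] * edLen
--     for i in roots:
--         visited = [0] * edLen
--         s = [i]
--         while s:
--             v = s.pop()
--             for j in range(edLen):
--                 if not visited[j]:
--                     if edges[j][0] == v:
--                         s.append(edges[j][1])
--                         visited[j] = 1
--                     elif edges[j][1] == v:
--                         s.append(edges[j][0])
--                         edges[j][0], edges[j][1] = edges[j][1], edges[j][0]
--                         answer[j] += 1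
--                         visited[j] = 1
--
--     return answer
-- ===== SOURCE B (Python) =====
-- def solution(edges, roots):
--     # Faster re-implementation: adjacency lists keyed by node value plus an
--     # orientation table, so each DFS pop touches only incident edges instead of
--     # scanning every edge; a per-root `done` set skips nodes already expanded
--     # (all their incident edges are visited by then, so the rescan would be a no-op).
--     # Return value only: unlike A, it does not mutate `edges`.
--     n = len(edges)
--     adj = {}
--     j = 0
--     for e in edges:
--         a, b = e[0], e[1]
--         adj.setdefault(a, []).append(j)
--         if b != a:
--             adj.setdefault(b, []).append(j)
--         j += 1
--     ori = [(e[0], e[1]) for e in edges]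
--     answer = [0] * n
--     for r in roots:
--         visited = [0] * n
--         done = set()
--         stack = [r]
--         while stack:
--             v = stack.pop()
--             if v in done:
--                 continue
--             done.add(v)
--             for j in adj.get(v, ()):
--                 if not visited[j]:
--                     a, b = ori[j]
--                     if a == v:
--                         stack.append(b)
--                     else:
--                         stack.append(a)
--                         ori[j] = (b, a)
--                         answer[j] += 1
--                     visited[j] = 1
--     return answer
-- ===== Notes on version B (the rewrite author's own statement) =====
-- stated objective: faster
-- what changed: Replaces A's per-pop scan of the entire edge list with a precomputed adjacency index (node value -> incident edge indices) plus an orientation table, and a per-root set of already-expanded node values skips repeated pops (all their incident edges are visited by then); B also does not mutate the edges argument (A swaps endpoints in place).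
-- outside the precondition, e.g. on solution([[1]], []): A returns [0], B raises IndexError
import Mathlib
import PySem

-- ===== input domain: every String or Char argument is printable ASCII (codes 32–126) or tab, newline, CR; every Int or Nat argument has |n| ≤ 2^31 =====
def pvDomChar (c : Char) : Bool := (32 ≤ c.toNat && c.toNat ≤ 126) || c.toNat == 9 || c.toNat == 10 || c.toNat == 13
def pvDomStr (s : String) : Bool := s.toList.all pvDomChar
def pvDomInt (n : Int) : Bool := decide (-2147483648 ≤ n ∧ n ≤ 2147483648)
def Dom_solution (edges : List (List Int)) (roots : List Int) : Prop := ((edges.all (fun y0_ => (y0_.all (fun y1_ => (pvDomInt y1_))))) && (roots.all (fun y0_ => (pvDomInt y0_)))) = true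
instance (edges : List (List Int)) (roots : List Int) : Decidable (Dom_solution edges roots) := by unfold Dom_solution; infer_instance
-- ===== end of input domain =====

-- B replaces A's per-pop scan of all edges by a precomputed adjacency index plus an
-- orientation table (objective: faster, asymptotically).  Equivalence is about the
-- RETURN value only: Python A mutates `edges` in place (endpoint swaps); B does not.

-- ===== PORT A =====
-- one inner-loop body of A: `for j in range(edLen): ...`; state = (edges, visited, answer, s)
-- (list reads/writes use getD/set at a Nat index: exact here, since j always lies in
-- [0, edLen) and rows have length ≥ 2 under Pre_solution)
def aScan (v : Int) :
    (List (List Int) × List Int × List Int × List Int) → Nat →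
    (List (List Int) × List Int × List Int × List Int)
  | (cur, vis, ans, s), j =>
    if vis.getD j 0 = 0 then
      if (cur.getD j []).getD 0 0 = v then
        (cur, vis.set j 1, ans, s ++ [(cur.getD j []).getD 1 0])
      else if (cur.getD j []).getD 1 0 = v then
        (cur.set j (((cur.getD j []).set 0 ((cur.getD j []).getD 1 0)).set 1
           ((cur.getD j []).getD 0 0)),
         vis.set j 1, ans.set j (ans.getD j 0 + 1), s ++ [(cur.getD j []).getD 0 0])
      else (cur, vis, ans, s)
    else (cur, vis, ans, s)

-- A's `while s:` loop; fuel = edLen+1 bounds the number of pops exactly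
-- (1 initial element + at most one push per edge, each push marking an edge visited)
def aLoop (n : Nat) : Nat → List (List Int) → List Int → List Int → List Int →
    List (List Int) × List Int
  | 0, cur, _, ans, _ => (cur, ans)
  | fuel + 1, cur, vis, ans, s =>
    if h : s = [] then (cur, ans)
    else
      let v := s.getLast h
      let st := (List.range n).foldl (aScan v) (cur, vis, ans, s.dropLast)
      aLoop n fuel st.1 st.2.1 st.2.2.1 st.2.2.2

def solution (edges : List (List Int)) (roots : List Int) : List Int :=
  let n := edges.length
  (roots.foldl
    (fun (st : List (List Int) × List Int) i =>
      aLoop n (n + 1) st.1 (List.replicate n 0) st.2 [i])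
    (edges, List.replicate n 0)).2

-- ===== PORT B =====
-- `adj.setdefault(a, []).append(j); if b != a: adj.setdefault(b, []).append(j)`
def adjStep (d : PySem.Dict Int (List Nat)) (j : Nat) (e : List Int) :
    PySem.Dict Int (List Nat) :=
  let a := e.getD 0 0
  let b := e.getD 1 0
  let d1 := d.insert a (d.getD a [] ++ [j])
  if b ≠ a then d1.insert b (d1.getD b [] ++ [j]) else d1

-- `j = 0; for e in edges: ...; j += 1`
def buildAdj (j : Nat) : List (List Int) → PySem.Dict Int (List Nat) →
    PySem.Dict Int (List Nat)
  | [], d => d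
  | e :: rest, d => buildAdj (j + 1) rest (adjStep d j e)

-- one inner-loop body of B: `for j in adj.get(v, ()): ...`; state = (ori, visited, answer, stack)
def bScan (v : Int) :
    (List (Int × Int) × List Int × List Int × List Int) → Nat →
    (List (Int × Int) × List Int × List Int × List Int)
  | (ori, vis, ans, s), j =>
    if vis.getD j 0 = 0 then
      if (ori.getD j (0, 0)).1 = v then
        (ori, vis.set j 1, ans, s ++ [(ori.getD j (0, 0)).2])
      else
        (ori.set j ((ori.getD j (0, 0)).2, (ori.getD j (0, 0)).1), vis.set j 1,
         ans.set j (ans.getD j 0 + 1), s ++ [(ori.getD j (0, 0)).1])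
    else (ori, vis, ans, s)

-- B's `while stack:` loop; `done` is the per-root set of already-expanded node
-- values (`if v in done: continue`)
def bLoop (adj : PySem.Dict Int (List Nat)) :
    Nat → List (Int × Int) → List Int → List Int → List Int → PySem.Set Int →
    List (Int × Int) × List Int
  | 0, ori, _, ans, _, _ => (ori, ans)
  | fuel + 1, ori, vis, ans, s, done =>
    if h : s = [] then (ori, ans)
    else
      let v := s.getLast h
      if PySem.Set.contains done v then bLoop adj fuel ori vis ans s.dropLast done
      else
        let st := (adj.getD v []).foldl (bScan v) (ori, vis, ans, s.dropLast)
        bLoop adj fuel st.1 st.2.1 st.2.2.1 st.2.2.2 (PySem.Set.add done v)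

def solution_alt (edges : List (List Int)) (roots : List Int) : List Int :=
  let n := edges.length
  let adj := buildAdj 0 edges PySem.Dict.empty
  let ori0 := edges.map (fun e => (e.getD 0 0, e.getD 1 0))
  (roots.foldl
    (fun (st : List (Int × Int) × List Int) r =>
      bLoop adj (n + 1) st.1 (List.replicate n 0) st.2 [r] PySem.Set.empty)
    (ori0, List.replicate n 0)).2

-- ===== PRECONDITION & SPEC =====
-- Pre_ excludes inputs containing an edge row with fewer than two entries: on those
-- A raises IndexError whenever roots is nonempty, and B's adjacency build raises
-- IndexError even when roots is empty (where A still returns the all-zero list).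
def Pre_solution (edges : List (List Int)) (roots : List Int) : Prop :=
  ∀ e ∈ edges, 2 ≤ e.length
instance (edges : List (List Int)) (roots : List Int) : Decidable (Pre_solution edges roots) := by
  unfold Pre_solution; infer_instance
def pvWitness_solution : List (List Int) × List Int := ([[1, 2], [2, 3]], [1])

def Spec_solution (edges : List (List Int)) (roots : List Int) (out : List Int) : Prop := out = solution_alt edges roots
instance (edges : List (List Int)) (roots : List Int) (out : List Int) : Decidable (Spec_solution edges roots out) := by unfold Spec_solution; infer_instance

-- ===== CLAIM (what is proved, stated in full; the proofs are below) =====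
def Claim_equal_solution : Prop := ∀ (edges : List (List Int)) (roots : List Int), Dom_solution edges roots → Pre_solution edges roots → Spec_solution edges roots (solution edges roots)


-- ===== LEMMAS AND PROOFS =====

-- Bool: original edge j is incident to node v
def inc (edges : List (List Int)) (v : Int) (j : Nat) : Bool :=
  ((edges.getD j []).getD 0 0 == v) || ((edges.getD j []).getD 1 0 == v)

-- relation between A's mutated edge rows and B's orientation table
def RelCO (edges cur : List (List Int)) (ori : List (Int × Int)) : Prop :=
  cur.length = edges.length ∧ ori.length = edges.length ∧
  ∀ j, j < edges.length →
    (ori.getD j (0, 0) = ((edges.getD j []).getD 0 0, (edges.getD j []).getD 1 0) ∨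
     ori.getD j (0, 0) = ((edges.getD j []).getD 1 0, (edges.getD j []).getD 0 0)) ∧
    cur.getD j [] =
      ((edges.getD j []).set 0 (ori.getD j (0, 0)).1).set 1 (ori.getD j (0, 0)).2

-- small list-indexing lemmas
theorem getD_set_self {α : Type} (l : List α) (i : Nat) (h : i < l.length) (x d : α) :
    (l.set i x).getD i d = x := by
  simp [List.getD, List.getElem?_set, h]

theorem getD_set_ne {α : Type} (l : List α) (i j : Nat) (h : i ≠ j) (x d : α) :
    (l.set i x).getD j d = l.getD j d := by
  simp [List.getD, List.getElem?_set, h]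

theorem set2_getD0 {α : Type} (l : List α) (a b d : α) (h : 1 ≤ l.length) :
    ((l.set 0 a).set 1 b).getD 0 d = a := by
  match l with
  | [] => simp at h
  | x :: t => cases t <;> simp [List.set]

theorem set2_getD1 {α : Type} (l : List α) (a b d : α) (h : 2 ≤ l.length) :
    ((l.set 0 a).set 1 b).getD 1 d = b := by
  match l with
  | [] => simp at h
  | [x] => simp at h
  | x :: y :: t => simp [List.set]

theorem set2_set2 {α : Type} (l : List α) (a b c e : α) :
    ((((l.set 0 a).set 1 b).set 0 c).set 1 e) = (l.set 0 c).set 1 e := by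
  rw [List.set_comm b c (by omega : (1:Nat) ≠ 0), List.set_set, List.set_set]

theorem set2_self {α : Type} (l : List α) (d : α) (h : 2 ≤ l.length) :
    (l.set 0 (l.getD 0 d)).set 1 (l.getD 1 d) = l := by
  match l with
  | [] => simp at h
  | [x] => simp at h
  | x :: y :: t => simp [List.set]

theorem getD_mem' {α : Type} (l : List α) (j : Nat) (d : α) (h : j < l.length) :
    l.getD j d ∈ l := by
  simp [List.getD, List.getElem?_eq_getElem h]

theorem adjStep_getD (d : PySem.Dict Int (List Nat)) (j : Nat) (e : List Int) (v : Int) :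
    (adjStep d j e).getD v [] =
      d.getD v [] ++ (if (e.getD 0 0 == v) || (e.getD 1 0 == v) then [j] else []) := by
  unfold adjStep
  by_cases hba : e.getD 1 0 = e.getD 0 0
  · rw [if_neg (not_not_intro hba), PySem.Dict.getD_insert]
    by_cases hv : v = e.getD 0 0
    · subst hv
      rw [if_pos rfl]
      simp [List.getD]
    · rw [if_neg hv]
      have h1 : (e.getD 0 0 == v) = false := by
        simp only [beq_eq_false_iff_ne, ne_eq]; exact fun h => hv h.symm
      have h2 : (e.getD 1 0 == v) = false := by rw [hba]; exact h1
      simp_all [List.getD]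
  · rw [if_pos hba]
    simp only [PySem.Dict.getD_insert]
    by_cases h1 : v = e.getD 1 0
    · subst h1
      rw [if_pos rfl, if_neg hba]
      have h2 : (e.getD 0 0 == e.getD 1 0) = false := by
        simp only [beq_eq_false_iff_ne, ne_eq]; exact fun h => hba h.symm
      simp [h2]
    · rw [if_neg h1]
      have h2 : (e.getD 1 0 == v) = false := by
        simp only [beq_eq_false_iff_ne, ne_eq]; exact fun h => h1 h.symm
      by_cases h0 : v = e.getD 0 0
      · subst h0; rw [if_pos rfl]; simp [h2]
      · rw [if_neg h0]
        have h3 : (e.getD 0 0 == v) = false := by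
          simp only [beq_eq_false_iff_ne, ne_eq]; exact fun h => h0 h.symm
        simp_all [List.getD]

theorem adj_getD (rows : List (List Int)) (j0 : Nat) (d : PySem.Dict Int (List Nat))
    (v : Int) :
    (buildAdj j0 rows d).getD v [] =
      d.getD v [] ++ ((List.range rows.length).filter (inc rows v)).map (j0 + .) := by
  induction rows generalizing j0 d with
  | nil => simp [buildAdj]
  | cons e rest ih =>
    show (buildAdj (j0+1) rest (adjStep d j0 e)).getD v [] = _
    rw [ih, adjStep_getD, List.append_assoc]
    congr 1
    rw [List.length_cons, List.range_succ_eq_map, List.filter_cons]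
    have hinc0 : inc (e :: rest) v 0 = ((e.getD 0 0 == v) || (e.getD 1 0 == v)) := by
      simp [inc, List.getD]
    have hmap : (List.map Nat.succ (List.range rest.length)).filter (inc (e :: rest) v)
        = (List.filter (inc rest v) (List.range rest.length)).map Nat.succ := by
      rw [List.filter_map]
      have hpred : (inc (e :: rest) v ∘ Nat.succ) = inc rest v := by
        funext k
        simp [Function.comp, inc, List.getD]
      rw [hpred]
    rw [hinc0, hmap]
    have htail : (List.filter (inc rest v) (List.range rest.length)).map
          (fun k => j0 + Nat.succ k)
        = (List.filter (inc rest v) (List.range rest.length)).map (fun k => j0 + 1 + k) := by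
      apply List.map_congr_left; intro k _; omega
    by_cases hc : ((e.getD 0 0 == v) || (e.getD 1 0 == v)) = true
    · simp only [hc, if_true, List.map_cons, List.map_map, List.cons_append,
        List.nil_append, Function.comp_def, Nat.add_zero]
      rw [htail]
    · simp only [Bool.not_eq_true] at hc
      simp only [hc, Bool.false_eq_true, if_false, List.nil_append, List.map_map,
        Function.comp_def]
      rw [htail]

theorem adj_getD_zero (edges : List (List Int)) (v : Int) :
    (buildAdj 0 edges PySem.Dict.empty).getD v [] =
      (List.range edges.length).filter (inc edges v) := by
  rw [adj_getD]
  simp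

theorem scan_eq (edges : List (List Int)) (hpre : ∀ e ∈ edges, 2 ≤ e.length) (v : Int)
    (l : List Nat) (hl : ∀ j ∈ l, j < edges.length)
    (cur : List (List Int)) (ori : List (Int × Int)) (vis ans s : List Int)
    (hrel : RelCO edges cur ori) :
    RelCO edges ((l.foldl (aScan v) (cur, vis, ans, s)).1)
      (((l.filter (inc edges v)).foldl (bScan v) (ori, vis, ans, s)).1) ∧
    (l.foldl (aScan v) (cur, vis, ans, s)).2 =
      ((l.filter (inc edges v)).foldl (bScan v) (ori, vis, ans, s)).2 := by
  induction l generalizing cur ori vis ans s with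
  | nil => exact ⟨hrel, rfl⟩
  | cons j rest ih =>
    have hj : j < edges.length := hl j (List.mem_cons_self ..)
    have hl' : ∀ k ∈ rest, k < edges.length := fun k hk => hl k (List.mem_cons_of_mem _ hk)
    obtain ⟨hc, ho, hji⟩ := hrel
    obtain ⟨hdisj, hcur⟩ := hji j hj
    have hE2 : 2 ≤ (edges.getD j []).length := hpre _ (getD_mem' edges j [] hj)
    have he0 : (cur.getD j []).getD 0 0 = (ori.getD j (0, 0)).1 := by
      rw [hcur]; exact set2_getD0 _ _ _ _ (by omega)
    have he1 : (cur.getD j []).getD 1 0 = (ori.getD j (0, 0)).2 := by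
      rw [hcur]; exact set2_getD1 _ _ _ _ hE2
    rw [List.foldl_cons, List.filter_cons]
    by_cases hincj : inc edges v j = true
    · -- incident edge: both sides process j
      simp only [hincj, if_true, List.foldl_cons]
      by_cases hvis : vis.getD j 0 = 0
      · by_cases hp1 : (ori.getD j (0, 0)).1 = v
        · -- forward edge: both push the far endpoint, no flip
          have ha : aScan v (cur, vis, ans, s) j =
              (cur, vis.set j 1, ans, s ++ [(ori.getD j (0, 0)).2]) := by
            simp only [aScan]
            rw [if_pos hvis, he0, he1, if_pos hp1]
          have hb : bScan v (ori, vis, ans, s) j =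
              (ori, vis.set j 1, ans, s ++ [(ori.getD j (0, 0)).2]) := by
            simp only [bScan]
            rw [if_pos hvis, if_pos hp1]
          rw [ha, hb]
          exact ih hl' _ _ _ _ _ ⟨hc, ho, hji⟩
        · -- reverse edge: flip, count, push the far endpoint
          have hp2 : (ori.getD j (0, 0)).2 = v := by
            simp only [inc, Bool.or_eq_true, beq_iff_eq] at hincj
            rcases hdisj with h | h <;> rw [h] at hp1 ⊢ <;> simp at hp1 ⊢ <;> tauto
          have ha : aScan v (cur, vis, ans, s) j =
              (cur.set j (((cur.getD j []).set 0 (ori.getD j (0, 0)).2).set 1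
                 (ori.getD j (0, 0)).1),
               vis.set j 1, ans.set j (ans.getD j 0 + 1), s ++ [(ori.getD j (0, 0)).1]) := by
            simp only [aScan]
            rw [if_pos hvis, he0, he1, if_neg (hp1 ∘ Eq.symm ∘ Eq.symm), if_pos hp2]
          have hb : bScan v (ori, vis, ans, s) j =
              (ori.set j ((ori.getD j (0, 0)).2, (ori.getD j (0, 0)).1),
               vis.set j 1, ans.set j (ans.getD j 0 + 1), s ++ [(ori.getD j (0, 0)).1]) := by
            simp only [bScan]
            rw [if_pos hvis, if_neg hp1]
          rw [ha, hb]
          refine ih hl' _ _ _ _ _ ⟨by simpa using hc, by simpa using ho, ?_⟩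
          intro k hk
          by_cases hkj : k = j
          · subst hkj
            rw [getD_set_self _ _ (by omega) _ _, getD_set_self _ _ (by omega) _ _]
            constructor
            · rcases hdisj with h | h <;> rw [h] <;> simp
            · rw [hcur, set2_set2]
          · rw [getD_set_ne _ _ _ (fun h => hkj h.symm) _ _,
                getD_set_ne _ _ _ (fun h => hkj h.symm) _ _]
            exact hji k hk
      · -- already visited: both sides skip j
        have ha : aScan v (cur, vis, ans, s) j = (cur, vis, ans, s) := by
          simp only [aScan]
          rw [if_neg hvis]
        have hb : bScan v (ori, vis, ans, s) j = (ori, vis, ans, s) := by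
          simp only [bScan]
          rw [if_neg hvis]
        rw [ha, hb]
        exact ih hl' _ _ _ _ _ ⟨hc, ho, hji⟩
    · -- non-incident edge: A's scan is a no-op, B never visits j
      have hnot : aScan v (cur, vis, ans, s) j = (cur, vis, ans, s) := by
        simp only [inc, Bool.or_eq_true, beq_iff_eq, not_or] at hincj
        push_neg at hincj
        have h1 : ¬ (cur.getD j []).getD 0 0 = v := by
          rw [he0]; rcases hdisj with h | h <;> rw [h] <;> simp <;> tauto
        have h2 : ¬ (cur.getD j []).getD 1 0 = v := by
          rw [he1]; rcases hdisj with h | h <;> rw [h] <;> simp <;> tauto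
        simp only [aScan]
        by_cases hvis : vis.getD j 0 = 0
        · rw [if_pos hvis, if_neg h1, if_neg h2]
        · rw [if_neg hvis]
      simp only [hincj, Bool.false_eq_true, if_false]
      rw [hnot]
      exact ih hl' _ _ _ _ _ ⟨hc, ho, hji⟩

theorem bScan_vis (v : Int) (l : List Nat)
    (ori : List (Int × Int)) (vis ans s : List Int)
    (hl : ∀ j ∈ l, j < vis.length) :
    ((l.foldl (bScan v) (ori, vis, ans, s)).2.1).length = vis.length ∧
    (∀ k, vis.getD k 0 ≠ 0 → ((l.foldl (bScan v) (ori, vis, ans, s)).2.1).getD k 0 ≠ 0) ∧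
    (∀ j ∈ l, ((l.foldl (bScan v) (ori, vis, ans, s)).2.1).getD j 0 ≠ 0) := by
  induction l generalizing ori vis ans s with
  | nil => exact ⟨rfl, fun k hk => hk, fun j hj => absurd hj (List.not_mem_nil)⟩
  | cons j rest ih =>
    have hj : j < vis.length := hl j (List.mem_cons_self ..)
    have hl' : ∀ k ∈ rest, k < vis.length := fun k hk => hl k (List.mem_cons_of_mem _ hk)
    rw [List.foldl_cons]
    by_cases hvis : vis.getD j 0 = 0
    · have hset : ∀ k ∈ rest, k < (vis.set j 1).length := by
        simpa using hl'
      have hmono : ∀ k, vis.getD k 0 ≠ 0 → (vis.set j 1).getD k 0 ≠ 0 := by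
        intro k hk
        by_cases hkj : j = k
        · subst hkj; rw [getD_set_self _ _ hj]; omega
        · rw [getD_set_ne _ _ _ hkj]; exact hk
      have hjvis : (vis.set j 1).getD j 0 ≠ 0 := by
        rw [getD_set_self _ _ hj]; omega
      by_cases hp1 : (ori.getD j (0, 0)).1 = v
      · have hb : bScan v (ori, vis, ans, s) j =
            (ori, vis.set j 1, ans, s ++ [(ori.getD j (0, 0)).2]) := by
          simp only [bScan]; rw [if_pos hvis, if_pos hp1]
        rw [hb]
        obtain ⟨h1, h2, h3⟩ := ih _ (vis.set j 1) _ _ hset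
        refine ⟨by simpa using h1, fun k hk => h2 k (hmono k hk), ?_⟩
        intro k hk
        rcases List.mem_cons.mp hk with hk | hk
        · subst hk; exact h2 k hjvis
        · exact h3 k hk
      · have hb : bScan v (ori, vis, ans, s) j =
            (ori.set j ((ori.getD j (0, 0)).2, (ori.getD j (0, 0)).1), vis.set j 1,
             ans.set j (ans.getD j 0 + 1), s ++ [(ori.getD j (0, 0)).1]) := by
          simp only [bScan]; rw [if_pos hvis, if_neg hp1]
        rw [hb]
        obtain ⟨h1, h2, h3⟩ := ih _ (vis.set j 1) _ _ hset
        refine ⟨by simpa using h1, fun k hk => h2 k (hmono k hk), ?_⟩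
        intro k hk
        rcases List.mem_cons.mp hk with hk | hk
        · subst hk; exact h2 k hjvis
        · exact h3 k hk
    · have hb : bScan v (ori, vis, ans, s) j = (ori, vis, ans, s) := by
        simp only [bScan]; rw [if_neg hvis]
      rw [hb]
      obtain ⟨h1, h2, h3⟩ := ih _ vis _ _ hl'
      refine ⟨h1, h2, ?_⟩
      intro k hk
      rcases List.mem_cons.mp hk with hk | hk
      · subst hk; exact h2 k hvis
      · exact h3 k hk

theorem aScan_noop (edges : List (List Int)) (hpre : ∀ e ∈ edges, 2 ≤ e.length)
    (v : Int) (l : List Nat) (hl : ∀ j ∈ l, j < edges.length)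
    (cur : List (List Int)) (ori : List (Int × Int)) (vis ans s : List Int)
    (hrel : RelCO edges cur ori)
    (hvisited : ∀ j ∈ l, inc edges v j = true → vis.getD j 0 ≠ 0) :
    l.foldl (aScan v) (cur, vis, ans, s) = (cur, vis, ans, s) := by
  induction l with
  | nil => rfl
  | cons j rest ih =>
    have hj : j < edges.length := hl j (List.mem_cons_self ..)
    have hl' : ∀ k ∈ rest, k < edges.length := fun k hk => hl k (List.mem_cons_of_mem _ hk)
    have hv' : ∀ k ∈ rest, inc edges v k = true → vis.getD k 0 ≠ 0 :=
      fun k hk => hvisited k (List.mem_cons_of_mem _ hk)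
    obtain ⟨hc, ho, hji⟩ := hrel
    obtain ⟨hdisj, hcur⟩ := hji j hj
    have hE2 : 2 ≤ (edges.getD j []).length := hpre _ (getD_mem' edges j [] hj)
    have he0 : (cur.getD j []).getD 0 0 = (ori.getD j (0, 0)).1 := by
      rw [hcur]; exact set2_getD0 _ _ _ _ (by omega)
    have he1 : (cur.getD j []).getD 1 0 = (ori.getD j (0, 0)).2 := by
      rw [hcur]; exact set2_getD1 _ _ _ _ hE2
    have hstep : aScan v (cur, vis, ans, s) j = (cur, vis, ans, s) := by
      by_cases hvis : vis.getD j 0 = 0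
      · have hincj : inc edges v j = false := by
          by_contra hh
          simp only [Bool.not_eq_false] at hh
          exact (hvisited j (List.mem_cons_self ..) hh) hvis
        simp only [inc, Bool.or_eq_false_iff, beq_eq_false_iff_ne, ne_eq] at hincj
        have h1 : ¬ (cur.getD j []).getD 0 0 = v := by
          rw [he0]; rcases hdisj with h | h <;> rw [h] <;> simp <;> tauto
        have h2 : ¬ (cur.getD j []).getD 1 0 = v := by
          rw [he1]; rcases hdisj with h | h <;> rw [h] <;> simp <;> tauto
        simp only [aScan]
        rw [if_pos hvis, if_neg h1, if_neg h2]
      · simp only [aScan]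
        rw [if_neg hvis]
    rw [List.foldl_cons, hstep]
    exact ih hl' hv'

theorem loop_eq (edges : List (List Int)) (hpre : ∀ e ∈ edges, 2 ≤ e.length)
    (fuel : Nat) (cur : List (List Int)) (ori : List (Int × Int)) (vis ans s : List Int)
    (done : PySem.Set Int)
    (hrel : RelCO edges cur ori) (hvlen : vis.length = edges.length)
    (hdone : ∀ w, PySem.Set.contains done w = true →
      ∀ j, j < edges.length → inc edges w j = true → vis.getD j 0 ≠ 0) :
    RelCO edges (aLoop edges.length fuel cur vis ans s).1
        (bLoop (buildAdj 0 edges PySem.Dict.empty) fuel ori vis ans s done).1 ∧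
    (aLoop edges.length fuel cur vis ans s).2 =
      (bLoop (buildAdj 0 edges PySem.Dict.empty) fuel ori vis ans s done).2 := by
  induction fuel generalizing cur ori vis ans s done with
  | zero => exact ⟨hrel, rfl⟩
  | succ fuel ih =>
    rw [aLoop, bLoop]
    by_cases h : s = []
    · rw [dif_pos h, dif_pos h]
      exact ⟨hrel, rfl⟩
    · rw [dif_neg h, dif_neg h]
      simp only []
      by_cases hd : PySem.Set.contains done (s.getLast h) = true
      · -- node already expanded: B skips, A's scan is a no-op
        rw [if_pos hd]
        have hnoop := aScan_noop edges hpre (s.getLast h) (List.range edges.length)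
          (fun j hj => List.mem_range.mp hj) cur ori vis ans (s.dropLast) hrel
          (fun j hj hij => hdone (s.getLast h) hd j (List.mem_range.mp hj) hij)
        rw [hnoop]
        exact ih _ _ _ _ _ _ hrel hvlen hdone
      · rw [if_neg hd]
        have hscan := scan_eq edges hpre (s.getLast h) (List.range edges.length)
          (fun j hj => List.mem_range.mp hj) cur ori vis ans (s.dropLast) hrel
        rw [adj_getD_zero]
        obtain ⟨hrel', heq⟩ := hscan
        have h21 := congrArg (fun t : List Int × List Int × List Int => t.1) heq
        have h22 := congrArg (fun t : List Int × List Int × List Int => t.2.1) heq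
        have h23 := congrArg (fun t : List Int × List Int × List Int => t.2.2) heq
        simp only at h21 h22 h23
        rw [h21, h22, h23]
        -- the new visited list after the scan over the incident-edge list
        have hladj : ∀ j ∈ (List.range edges.length).filter (inc edges (s.getLast h)),
            j < vis.length := by
          intro j hj
          rw [hvlen]
          exact List.mem_range.mp (List.mem_of_mem_filter hj)
        have hv := bScan_vis (s.getLast h)
          ((List.range edges.length).filter (inc edges (s.getLast h)))
          ori vis ans (s.dropLast) hladj
        obtain ⟨hv1, hv2, hv3⟩ := hv
        refine ih _ _ _ _ _ _ hrel' (hv1.trans hvlen) ?_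
        intro w hw j hjn hij
        have hmem : w ∈ PySem.Set.add done (s.getLast h) := by
          simpa [List.contains_iff_mem] using hw
        rcases (PySem.Set.mem_add done (s.getLast h) w).mp hmem with hwold | hwv
        · exact hv2 j (hdone w (by simpa [List.contains_iff_mem] using hwold) j hjn hij)
        · subst hwv
          exact hv3 j (List.mem_filter.mpr ⟨List.mem_range.mpr hjn, hij⟩)

theorem roots_eq (edges : List (List Int)) (hpre : ∀ e ∈ edges, 2 ≤ e.length)
    (roots : List Int) (cur : List (List Int)) (ori : List (Int × Int)) (ans : List Int)
    (hrel : RelCO edges cur ori) :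
    RelCO edges
        (roots.foldl (fun (st : List (List Int) × List Int) i =>
          aLoop edges.length (edges.length + 1) st.1
            (List.replicate edges.length 0) st.2 [i]) (cur, ans)).1
        (roots.foldl (fun (st : List (Int × Int) × List Int) r =>
          bLoop (buildAdj 0 edges PySem.Dict.empty) (edges.length + 1) st.1
            (List.replicate edges.length 0) st.2 [r] PySem.Set.empty) (ori, ans)).1 ∧
    (roots.foldl (fun (st : List (List Int) × List Int) i =>
          aLoop edges.length (edges.length + 1) st.1
            (List.replicate edges.length 0) st.2 [i]) (cur, ans)).2 =
    (roots.foldl (fun (st : List (Int × Int) × List Int) r =>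
          bLoop (buildAdj 0 edges PySem.Dict.empty) (edges.length + 1) st.1
            (List.replicate edges.length 0) st.2 [r] PySem.Set.empty) (ori, ans)).2 := by
  induction roots generalizing cur ori ans with
  | nil => exact ⟨hrel, rfl⟩
  | cons r rest ih =>
    simp only [List.foldl_cons]
    have h := loop_eq edges hpre (edges.length + 1) cur ori
      (List.replicate edges.length 0) ans [r] PySem.Set.empty hrel
      (by simp) (by intro w hw; simp [PySem.Set.contains, PySem.Set.empty] at hw)
    rcases haL : aLoop edges.length (edges.length + 1) cur
        (List.replicate edges.length 0) ans [r] with ⟨cur', ansA⟩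
    rcases hbL : bLoop (buildAdj 0 edges PySem.Dict.empty) (edges.length + 1) ori
        (List.replicate edges.length 0) ans [r] PySem.Set.empty with ⟨ori', ansB⟩
    rw [haL, hbL] at h
    obtain ⟨hrel', heq⟩ := h
    simp only at hrel' heq
    subst heq
    exact ih cur' ori' ansA hrel'

theorem rel_init (edges : List (List Int)) (hpre : ∀ e ∈ edges, 2 ≤ e.length) :
    RelCO edges edges (edges.map (fun e => (e.getD 0 0, e.getD 1 0))) := by
  refine ⟨rfl, by simp, ?_⟩
  intro j hj
  have hmap : (edges.map (fun e => (e.getD 0 0, e.getD 1 0))).getD j (0, 0)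
      = ((edges.getD j []).getD 0 0, (edges.getD j []).getD 1 0) := by
    simp [List.getD, List.getElem?_eq_getElem, hj, List.getElem?_map,
      List.getElem?_eq_getElem (by simpa using hj : j < (edges.map _).length)]
  refine ⟨Or.inl hmap, ?_⟩
  rw [hmap]
  exact (set2_self _ _ (hpre _ (getD_mem' edges j [] hj))).symm

-- ===== VERDICT (by name: the statement is the Claim_ definition above) =====
theorem solution_spec : Claim_equal_solution := by
  intro edges roots _ hpre
  unfold Spec_solution solution solution_alt
  exact (roots_eq edges hpre roots edges _ (List.replicate edges.length 0)
    (rel_init edges hpre)).2
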